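-- pv_equiv track=rewrite | github.com/mikeoller82/VideoGraphAI | plugins/agents.py | parse_scenes
-- ===== SOURCE A (Python) =====
-- from typing import Any, List, Dict, Tuple
--
-- def parse_scenes(response: str) -> List[Dict[str, Any]]:
--     scenes = []
--     current_scene = {}
--     for line in response.split('\n'):
--         line = line.strip()
--         if line.startswith("Scene"):
--             if current_scene:
--                 scenes.append(current_scene)
--             current_scene = {"number": line.split()[1].rstrip(':')}
--         elif line.startswith("- Visual:"):
--             current_scene["visual"] = line.split(":", 1)[1].strip()
--         elif line.startswith("- Text/Dialogue:"):
--             current_scene["text"] = line.split(":", 1)[1].strip()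
--         elif line.startswith("- Video Keyword:"):
--             current_scene["video_keyword"] = line.split(":", 1)[1].strip()
--         elif line.startswith("- Image Keyword:"):
--             current_scene["image_keyword"] = line.split(":", 1)[1].strip()
--     if current_scene:
--         scenes.append(current_scene)
--     return scenes
-- ===== SOURCE B (Python) =====
-- def parse_scenes(response):
--     FIELDS = [("- Visual:", "visual"), ("- Text/Dialogue:", "text"),
--               ("- Video Keyword:", "video_keyword"), ("- Image Keyword:", "image_keyword")]
--
--     def parse_block(block, headed):
--         d = {}
--         body = block
--         if headed:
--             d["number"] = block[0].split()[1].rstrip(':')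
--             body = block[1:]
--         for ln in body:
--             for prefix, key in FIELDS:
--                 if ln.startswith(prefix):
--                     d[key] = ln.split(":", 1)[1].strip()
--                     break
--         return d
--
--     # phase 1: split the stripped lines into blocks at each "Scene" header
--     blocks = []
--     acc = []
--     for ln in response.split('\n'):
--         ln = ln.strip()
--         if ln.startswith("Scene"):
--             blocks.append(acc)
--             acc = [ln]
--         else:
--             acc.append(ln)
--     blocks.append(acc)
--
--     # phase 2: parse each block; the leading header-less block only if it has fields
--     result = []
--     lead = parse_block(blocks[0], False)
--     if lead:
--         result.append(lead)
--     for blk in blocks[1:]: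
--         result.append(parse_block(blk, True))
--     return result
-- ===== Notes on version B (the rewrite author's own statement) =====
-- stated objective: alternative
-- what changed: A's single fused loop threading a mutable current-scene dict is replaced by a two-phase decomposition: phase 1 splits the stripped lines into 'Scene'-headed blocks, phase 2 maps each block through a small table-driven block parser (the header line gives 'number', the body is scanned against a FIELDS prefix table), emitting the leading header-less block only when it yielded fields.
import Mathlib
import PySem

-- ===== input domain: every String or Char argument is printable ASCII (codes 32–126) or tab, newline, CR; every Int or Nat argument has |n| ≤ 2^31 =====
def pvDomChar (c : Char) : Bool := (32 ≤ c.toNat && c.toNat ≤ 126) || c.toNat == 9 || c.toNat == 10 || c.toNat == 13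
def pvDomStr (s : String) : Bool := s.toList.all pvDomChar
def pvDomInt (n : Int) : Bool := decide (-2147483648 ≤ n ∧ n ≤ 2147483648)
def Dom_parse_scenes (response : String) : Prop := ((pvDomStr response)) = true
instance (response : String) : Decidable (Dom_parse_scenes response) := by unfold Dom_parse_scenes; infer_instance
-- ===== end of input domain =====

-- B re-implements A's single fused loop as two phases — split the stripped lines into
-- "Scene"-headed blocks, then parse each block with a table-driven field scanner;
-- objective: alternative decomposition (same cost), return values proved identical on Pre_.

-- shared line-level primitives (both Pythons evaluate these very expressions)
-- hand port of Python's s.rstrip(':') — drop every trailing ':' character; exact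
def pvRstripColon (s : String) : String :=
  String.ofList ((s.toList.reverse.dropWhile (fun c => c == ':')).reverse)

-- line.split()[1].rstrip(':')  (the [1] is total here; Pre_ excludes the IndexError inputs)
def pvSceneNumber (line : String) : String :=
  pvRstripColon ((PySem.Str.split₀ line).getD 1 "")

-- line.split(":", 1)[1].strip()  (every field line contains ':', so [1] exists)
def pvFieldVal (line : String) : String :=
  PySem.Str.strip (((PySem.Str.splitMax? line ":" 1).getD []).getD 1 "")

-- ===== PORT A =====
def pvStepA (st : List (PySem.Dict String String) × PySem.Dict String String) (rawline : String) :
    List (PySem.Dict String String) × PySem.Dict String String :=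
  let line := PySem.Str.strip rawline
  if PySem.Str.startswith line "Scene" then
    (st.1 ++ (if st.2.items = [] then [] else [st.2]),
     (PySem.Dict.empty).insert "number" (pvSceneNumber line))
  else if PySem.Str.startswith line "- Visual:" then
    (st.1, st.2.insert "visual" (pvFieldVal line))
  else if PySem.Str.startswith line "- Text/Dialogue:" then
    (st.1, st.2.insert "text" (pvFieldVal line))
  else if PySem.Str.startswith line "- Video Keyword:" then
    (st.1, st.2.insert "video_keyword" (pvFieldVal line))
  else if PySem.Str.startswith line "- Image Keyword:" then
    (st.1, st.2.insert "image_keyword" (pvFieldVal line))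
  else st

def parse_scenes (response : String) : List (List (String × String)) :=
  let st := ((PySem.Str.split? response "\n").getD []).foldl pvStepA ([], PySem.Dict.empty)
  (st.1 ++ (if st.2.items = [] then [] else [st.2])).map PySem.Dict.items

-- ===== PORT B =====
-- FIELDS table of Source B
def pvFields : List (String × String) :=
  [("- Visual:", "visual"), ("- Text/Dialogue:", "text"),
   ("- Video Keyword:", "video_keyword"), ("- Image Keyword:", "image_keyword")]

-- parse_block of Source B: the inner for-with-break over FIELDS is the first matching prefix
def pvParseBlock (block : List String) (headed : Bool) : PySem.Dict String String :=
  let d : PySem.Dict String String := PySem.Dict.empty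
  let p := if headed then (d.insert "number" (pvSceneNumber (block.getD 0 "")), block.drop 1)
           else (d, block)
  p.2.foldl (fun d ln =>
    match pvFields.find? (fun pk => PySem.Str.startswith ln pk.1) with
    | some pk => d.insert pk.2 (pvFieldVal ln)
    | none => d) p.1

-- phase-1 loop body of Source B
def pvStepB (st : List (List String) × List String) (rawln : String) :
    List (List String) × List String :=
  let ln := PySem.Str.strip rawln
  if PySem.Str.startswith ln "Scene" then (st.1 ++ [st.2], [ln])
  else (st.1, st.2 ++ [ln])

def parse_scenes_alt (response : String) : List (List (String × String)) :=
  let st := ((PySem.Str.split? response "\n").getD []).foldl pvStepB ([], [])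
  let blocks := st.1 ++ [st.2]
  let lead := pvParseBlock (blocks.getD 0 []) false
  let result := (if lead.items = [] then [] else [lead]) ++
                (blocks.drop 1).map (fun b => pvParseBlock b true)
  result.map PySem.Dict.items

-- ===== PRECONDITION & SPEC =====
-- Pre_ excludes exactly the inputs on which the Python A raises IndexError: a line whose
-- stripped form starts with "Scene" but consists of a single whitespace-token (bare "Scene…"),
-- where line.split()[1] has no element.  (B's Python raises there too.)
def Pre_parse_scenes (response : String) : Prop :=
  ∀ l ∈ (PySem.Str.split? response "\n").getD [],
    PySem.Str.startswith (PySem.Str.strip l) "Scene" = true →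
      2 ≤ (PySem.Str.split₀ (PySem.Str.strip l)).length
instance (response : String) : Decidable (Pre_parse_scenes response) := by
  unfold Pre_parse_scenes; infer_instance

def pvWitness_parse_scenes : String := "Scene 1:\n- Visual: a cat\n- Text/Dialogue: hi"

def Spec_parse_scenes (response : String) (out : List (List (String × String))) : Prop := out = parse_scenes_alt response
instance (response : String) (out : List (List (String × String))) : Decidable (Spec_parse_scenes response out) := by unfold Spec_parse_scenes; infer_instance

-- ===== CLAIM (what is proved, stated in full; the proofs are below) =====
def Claim_equal_parse_scenes : Prop := ∀ (response : String), Dom_parse_scenes response → Pre_parse_scenes response → Spec_parse_scenes response (parse_scenes response)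

-- ===== LEMMAS AND PROOFS =====

-- a dict touched by insert is never empty
theorem pv_insert_items_ne_nil (d : PySem.Dict String String) (k v : String) :
    (d.insert k v).items ≠ [] := by
  have hc := PySem.Dict.contains_insert_self d k v
  intro h
  rw [show d.insert k v = PySem.Dict.mk [] from PySem.Dict.ext h] at hc
  simp [PySem.Dict.contains] at hc

-- the field-scanning fold never empties a dict
theorem pv_fieldfold_ne (body : List String) (d : PySem.Dict String String) (h : d.items ≠ []) :
    (body.foldl (fun d ln =>
      match pvFields.find? (fun pk => PySem.Str.startswith ln pk.1) with
      | some pk => d.insert pk.2 (pvFieldVal ln)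
      | none => d) d).items ≠ [] := by
  induction body generalizing d with
  | nil => exact h
  | cons l t ih =>
      simp only [List.foldl_cons]
      cases hf : pvFields.find? (fun pk => PySem.Str.startswith l pk.1) with
      | none => exact ih d h
      | some pk => exact ih _ (pv_insert_items_ne_nil d pk.2 (pvFieldVal l))

-- a headed block always parses to a non-empty dict (it carries "number")
theorem pv_parseBlock_headed_ne (block : List String) :
    (pvParseBlock block true).items ≠ [] := by
  unfold pvParseBlock
  simp only [if_true]
  exact pv_fieldfold_ne _ _ (pv_insert_items_ne_nil _ _ _)

-- both loops have the shape "first component only grows by appends computed from the second"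
theorem pv_foldl_accum {δ : Type} {β : Type}
    (f : List β × δ → String → List β × δ)
    (g : δ → String → List β) (h : δ → String → δ)
    (hf : ∀ st x, f st x = (st.1 ++ g st.2 x, h st.2 x)) :
    ∀ (ls : List String) (S : List β) (d : δ),
      ls.foldl f (S, d) = (S ++ (ls.foldl f ([], d)).1, (ls.foldl f ([], d)).2) := by
  intro ls
  induction ls with
  | nil => intro S d; simp
  | cons x t ih =>
      intro S d
      simp only [List.foldl_cons, hf, List.nil_append]
      rw [ih (S ++ g d x) (h d x), ih (g d x) (h d x), List.append_assoc]

-- emit of A ("if current_scene: scenes.append(current_scene)")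
def pvEmit (d : PySem.Dict String String) : List (PySem.Dict String String) :=
  if d.items = [] then [] else [d]

-- assembly of B's blocks (first block headless unless `headed`, rest headed)
def pvAssemble (bs : List (List String)) (headed : Bool) : List (PySem.Dict String String) :=
  match bs with
  | [] => []
  | b :: rest =>
      (if headed then [pvParseBlock b true] else pvEmit (pvParseBlock b false)) ++
      rest.map (fun b => pvParseBlock b true)

-- the accumulator shapes of the two loops
def pvGA (d : PySem.Dict String String) (x : String) : List (PySem.Dict String String) :=
  if PySem.Str.startswith (PySem.Str.strip x) "Scene" then pvEmit d else []

def pvHA (d : PySem.Dict String String) (x : String) : PySem.Dict String String :=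
  let line := PySem.Str.strip x
  if PySem.Str.startswith line "Scene" then
    (PySem.Dict.empty).insert "number" (pvSceneNumber line)
  else if PySem.Str.startswith line "- Visual:" then d.insert "visual" (pvFieldVal line)
  else if PySem.Str.startswith line "- Text/Dialogue:" then d.insert "text" (pvFieldVal line)
  else if PySem.Str.startswith line "- Video Keyword:" then d.insert "video_keyword" (pvFieldVal line)
  else if PySem.Str.startswith line "- Image Keyword:" then d.insert "image_keyword" (pvFieldVal line)
  else d

theorem pvStepA_eq (st : List (PySem.Dict String String) × PySem.Dict String String) (x : String) :
    pvStepA st x = (st.1 ++ pvGA st.2 x, pvHA st.2 x) := by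
  unfold pvStepA pvGA pvHA pvEmit
  split_ifs <;> simp_all <;> split_ifs <;> rfl

def pvGB (acc : List String) (x : String) : List (List String) :=
  if PySem.Str.startswith (PySem.Str.strip x) "Scene" then [acc] else []

def pvHB (acc : List String) (x : String) : List String :=
  let ln := PySem.Str.strip x
  if PySem.Str.startswith ln "Scene" then [ln] else acc ++ [ln]

theorem pvStepB_eq (st : List (List String) × List String) (x : String) :
    pvStepB st x = (st.1 ++ pvGB st.2 x, pvHB st.2 x) := by
  unfold pvStepB pvGB pvHB
  split_ifs <;> simp_all

-- A's elif chain over field prefixes IS B's first-match scan of the FIELDS table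
theorem pv_chain_eq_find (d : PySem.Dict String String) (ln : String) :
    (if PySem.Str.startswith ln "- Visual:" then d.insert "visual" (pvFieldVal ln)
     else if PySem.Str.startswith ln "- Text/Dialogue:" then d.insert "text" (pvFieldVal ln)
     else if PySem.Str.startswith ln "- Video Keyword:" then d.insert "video_keyword" (pvFieldVal ln)
     else if PySem.Str.startswith ln "- Image Keyword:" then d.insert "image_keyword" (pvFieldVal ln)
     else d)
    = (match pvFields.find? (fun pk => PySem.Str.startswith ln pk.1) with
       | some pk => d.insert pk.2 (pvFieldVal ln)
       | none => d) := by
  simp only [pvFields, List.find?]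
  split_ifs <;> simp_all

-- appending one non-header line to a block applies one field step to its parse
theorem pv_parseBlock_snoc (acc : List String) (ln : String) (headed : Bool)
    (hacc : headed = true → acc ≠ []) :
    pvParseBlock (acc ++ [ln]) headed
      = (match pvFields.find? (fun pk => PySem.Str.startswith ln pk.1) with
         | some pk => (pvParseBlock acc headed).insert pk.2 (pvFieldVal ln)
         | none => pvParseBlock acc headed) := by
  unfold pvParseBlock
  cases headed with
  | false => simp [List.foldl_append]
  | true =>
      cases acc with
      | nil => exact absurd rfl (hacc rfl)
      | cons a t => simp [List.foldl_append]

-- headed assembly is a plain map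
theorem pvAssemble_true (bs : List (List String)) (h : bs ≠ []) :
    pvAssemble bs true = bs.map (fun b => pvParseBlock b true) := by
  cases bs with
  | nil => exact absurd rfl h
  | cons b rest => simp [pvAssemble]

theorem pvEmit_headed (acc : List String) :
    pvEmit (pvParseBlock acc true) = [pvParseBlock acc true] := by
  simp [pvEmit, pv_parseBlock_headed_ne acc]

set_option maxHeartbeats 1000000 in
theorem pv_main (ls : List String) :
    ∀ (acc : List String) (headed : Bool), (headed = true → acc ≠ []) →
      (((ls.foldl pvStepA ([], pvParseBlock acc headed)).1 ++
          pvEmit (ls.foldl pvStepA ([], pvParseBlock acc headed)).2)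
        = pvAssemble ((ls.foldl pvStepB ([], acc)).1 ++ [(ls.foldl pvStepB ([], acc)).2]) headed) := by
  induction ls with
  | nil =>
      intro acc headed hacc
      cases headed with
      | false => simp [pvAssemble]
      | true => simp [pvAssemble, pvEmit_headed]
  | cons l t ih =>
      intro acc headed hacc
      simp only [List.foldl_cons, pvStepA_eq, pvStepB_eq, List.nil_append]
      by_cases hsc : PySem.Str.startswith (PySem.Str.strip l) "Scene" = true
      · -- header line: A flushes the dict, B flushes the block
        have hGA : pvGA (pvParseBlock acc headed) l = pvEmit (pvParseBlock acc headed) := by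
          simp only [pvGA, hsc, if_true]
        have hHA : pvHA (pvParseBlock acc headed) l
            = pvParseBlock [PySem.Str.strip l] true := by
          simp only [pvHA, hsc, if_true]; rfl
        have hGB : pvGB acc l = [acc] := by simp only [pvGB, hsc, if_true]
        have hHB : pvHB acc l = [PySem.Str.strip l] := by simp only [pvHB, hsc, if_true]
        rw [hGA, hHA, hGB, hHB,
          pv_foldl_accum pvStepA pvGA pvHA pvStepA_eq t (pvEmit (pvParseBlock acc headed)) _,
          pv_foldl_accum pvStepB pvGB pvHB pvStepB_eq t [acc] _]
        have hih := ih [PySem.Str.strip l] true (fun _ => by simp)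
        rw [List.append_assoc, hih, pvAssemble_true _ (by simp)]
        simp only [List.nil_append, List.cons_append, pvAssemble]
        congr 1
        cases headed with
        | false => rfl
        | true => simp only [if_true, pvEmit_headed]
      · -- ordinary line: A applies a field step, B appends the line to the block
        have hsc' : PySem.Str.startswith (PySem.Str.strip l) "Scene" = false := by
          simpa using hsc
        have hGA : pvGA (pvParseBlock acc headed) l = [] := by
          simp only [pvGA, hsc', Bool.false_eq_true, if_false]
        have hHA : pvHA (pvParseBlock acc headed) l
            = pvParseBlock (acc ++ [PySem.Str.strip l]) headed := by
          rw [pv_parseBlock_snoc acc (PySem.Str.strip l) headed hacc]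
          simp only [pvHA, hsc', Bool.false_eq_true, if_false]
          exact pv_chain_eq_find (pvParseBlock acc headed) (PySem.Str.strip l)
        have hGB : pvGB acc l = [] := by
          simp only [pvGB, hsc', Bool.false_eq_true, if_false]
        have hHB : pvHB acc l = acc ++ [PySem.Str.strip l] := by
          simp only [pvHB, hsc', Bool.false_eq_true, if_false]
        rw [hGA, hHA, hGB, hHB]
        exact ih (acc ++ [PySem.Str.strip l]) headed (fun _ => by simp)

-- ===== VERDICT (by name: the statement is the Claim_ definition above) =====
theorem parse_scenes_spec : Claim_equal_parse_scenes := by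
  intro response _ _
  unfold Spec_parse_scenes parse_scenes parse_scenes_alt
  have h := pv_main ((PySem.Str.split? response "\n").getD []) [] false (by simp)
  have hinit : pvParseBlock [] false = (PySem.Dict.empty : PySem.Dict String String) := rfl
  rw [hinit] at h
  simp only []
  rw [show (if ((((PySem.Str.split? response "\n").getD []).foldl pvStepA
        ([], (PySem.Dict.empty : PySem.Dict String String))).2.items = [])
      then ([] : List (PySem.Dict String String))
      else [(((PySem.Str.split? response "\n").getD []).foldl pvStepA ([], PySem.Dict.empty)).2])
    = pvEmit ((((PySem.Str.split? response "\n").getD []).foldl pvStepA ([], PySem.Dict.empty)).2)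
    from rfl]
  rw [h]
  -- now identify B's port assembly with pvAssemble ... false
  cases (((PySem.Str.split? response "\n").getD []).foldl pvStepB ([], [])).1 with
  | nil => simp [pvAssemble, pvEmit]
  | cons b bs => simp [pvAssemble, pvEmit]
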